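-- pv_equiv track=rewrite | github.com/ain3sh/codecanvas | codecanvas/views/architecture.py | _pick_grid
-- ===== SOURCE A (Python) =====
-- from typing import Dict, Iterable, List, Optional, Set, Tuple
--
-- def _pick_grid(n: int) -> Tuple[int, int]:
--     """Pick a (cols, rows) grid that keeps cards large.
--
--     Heuristic targets:
--     - 1..4  -> Nx1
--     - 5..8  -> 3x2 / 4x2
--     """
--     if n <= 0:
--         return 1, 1
--     n = min(8, n)
--
--     cols = min(4, n)
--     rows = (n + cols - 1) // cols
--
--     # Keep rows <= 3 to avoid tiny cards.
--     while rows > 3 and cols > 1: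
--         cols -= 1
--         rows = (n + cols - 1) // cols
--
--     return cols, rows
-- ===== SOURCE B (Python) =====
-- _GRID = [(1, 1), (1, 1), (2, 1), (3, 1), (4, 1), (4, 2), (4, 2), (4, 2), (4, 2)]
--
-- def _pick_grid(n: int):
--     return _GRID[min(8, max(0, n))]
-- ===== Notes on version B (the rewrite author's own statement) =====
-- stated objective: simpler
-- what changed: Replaced the arithmetic cols/rows computation and the dead while-loop with a single precomputed lookup table indexed by the clamped card count.
import Mathlib
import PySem

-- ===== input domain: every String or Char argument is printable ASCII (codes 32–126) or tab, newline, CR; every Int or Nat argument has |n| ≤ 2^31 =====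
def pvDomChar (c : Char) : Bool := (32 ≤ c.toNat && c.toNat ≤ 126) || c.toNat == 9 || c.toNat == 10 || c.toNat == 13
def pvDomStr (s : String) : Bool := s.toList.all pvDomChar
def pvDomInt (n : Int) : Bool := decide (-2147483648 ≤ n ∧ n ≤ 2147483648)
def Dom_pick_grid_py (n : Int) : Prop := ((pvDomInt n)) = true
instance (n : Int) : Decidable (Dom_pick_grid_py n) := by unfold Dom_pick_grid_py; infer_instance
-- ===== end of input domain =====

-- B replaces A's arithmetic cols/rows computation and dead while-loop with a precomputed lookup table indexed by the clamped card count (objective: simpler).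


-- ===== PORT A =====
-- while-loop of A, transliterated: decrement cols while rows > 3 and cols > 1
-- (fuel = cols.toNat bounds the loop; cols strictly decreases and stays > 1, so fuel never runs out)
def pickGridLoop : Nat → Int → Int → Int → Int × Int
  | 0, _, cols, rows => (cols, rows)
  | fuel + 1, n, cols, rows =>
    if rows > 3 ∧ cols > 1 then
      pickGridLoop fuel n (cols - 1) (PySem.Int.floordiv (n + (cols - 1) - 1) (cols - 1))
    else
      (cols, rows)

def pick_grid_py (n : Int) : Int × Int :=
  if n ≤ 0 then (1, 1)
  else
    let n' := min 8 n
    let cols := min 4 n'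
    let rows := PySem.Int.floordiv (n' + cols - 1) cols
    pickGridLoop cols.toNat n' cols rows

-- ===== PORT B =====
def pvGRID : List (Int × Int) :=
  [(1, 1), (1, 1), (2, 1), (3, 1), (4, 1), (4, 2), (4, 2), (4, 2), (4, 2)]

def pick_grid_py_alt (n : Int) : Int × Int :=
  (PySem.List.pyGet? pvGRID (min 8 (max 0 n))).getD (0, 0)

-- ===== PRECONDITION & SPEC =====
def Spec_pick_grid_py (n : Int) (out : Int × Int) : Prop := out = pick_grid_py_alt n
instance (n : Int) (out : Int × Int) : Decidable (Spec_pick_grid_py n out) := by unfold Spec_pick_grid_py; infer_instance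

-- ===== CLAIM (what is proved, stated in full; the proofs are below) =====
def Claim_equal_pick_grid_py : Prop := ∀ (n : Int), Dom_pick_grid_py n → Spec_pick_grid_py n (pick_grid_py n)

-- ===== LEMMAS AND PROOFS =====

-- ===== VERDICT (by name: the statement is the Claim_ definition above) =====
-- for n ≥ 8 both sides coincide with their value at 8
theorem pick_grid_py_spec : Claim_equal_pick_grid_py := by
  unfold Claim_equal_pick_grid_py
  intro n _
  unfold Spec_pick_grid_py
  by_cases h8 : n ≥ 8
  · have h1 : pick_grid_py n = pick_grid_py 8 := by
      unfold pick_grid_py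
      have : min 8 n = (8 : Int) := by omega
      simp [this]; omega
    have h2 : pick_grid_py_alt n = pick_grid_py_alt 8 := by
      unfold pick_grid_py_alt
      have : min 8 (max 0 n) = (8 : Int) := by omega
      simp [this]
    rw [h1, h2]; decide
  · by_cases h0 : n ≤ 0
    · have h1 : pick_grid_py n = (1, 1) := by unfold pick_grid_py; simp [h0]
      have h2 : pick_grid_py_alt n = (1, 1) := by
        unfold pick_grid_py_alt
        have : max 0 n = (0 : Int) := by omega
        have hm : min 8 (max 0 n) = (0 : Int) := by omega
        simp [hm]; decide
      rw [h1, h2]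
    · interval_cases n <;> decide
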